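-- pv_equiv track=rewrite | github.com/AdamZhouSE/pythonHomework | Code/CodeRecords/2973/39160/309963.py | count
-- ===== SOURCE A (Python) =====
-- def count(s, sorts):
--     a = 0
--     for i in range(len(s) - 8):
--         temp = s[i: i+9]
--         temp = sor(temp)
--         if temp == sorts:
--             a+=1
--     return a
--
-- def sor(s):
--     s = list(s)
--     s.sort()
--     t = ''
--     for i in s:
--         t+=i
--     return t
-- ===== SOURCE B (Python) =====
-- # Sliding-window frequency table over ASCII codes: instead of sorting every
-- # length-9 window, return 0 early unless `sorts` is itself sorted, then keep a
-- # 128-slot count array updated incrementally as the window slides.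
-- # (Assumes the stated input domain: printable ASCII plus tab/newline/CR.)
-- def count(s, sorts):
--     n = len(s)
--     if n < 9 or list(sorts) != sorted(sorts):
--         return 0
--     tgt = [0] * 128
--     for c in sorts:
--         tgt[ord(c)] += 1
--     cur = [0] * 128
--     for c in s[:9]:
--         cur[ord(c)] += 1
--     a = 1 if cur == tgt else 0
--     for i in range(9, n):
--         cur[ord(s[i])] += 1
--         cur[ord(s[i - 9])] -= 1
--         if cur == tgt:
--             a += 1
--     return a
-- ===== Notes on version B (the rewrite author's own statement) =====
-- stated objective: faster
-- what changed: A re-sorts every length-9 window (O(n * 9 log 9) with string building); B returns 0 early unless sorts is already sorted, then slides a 128-slot character-frequency array across s, updating two counters per step instead of sorting each window.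
import Mathlib
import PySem

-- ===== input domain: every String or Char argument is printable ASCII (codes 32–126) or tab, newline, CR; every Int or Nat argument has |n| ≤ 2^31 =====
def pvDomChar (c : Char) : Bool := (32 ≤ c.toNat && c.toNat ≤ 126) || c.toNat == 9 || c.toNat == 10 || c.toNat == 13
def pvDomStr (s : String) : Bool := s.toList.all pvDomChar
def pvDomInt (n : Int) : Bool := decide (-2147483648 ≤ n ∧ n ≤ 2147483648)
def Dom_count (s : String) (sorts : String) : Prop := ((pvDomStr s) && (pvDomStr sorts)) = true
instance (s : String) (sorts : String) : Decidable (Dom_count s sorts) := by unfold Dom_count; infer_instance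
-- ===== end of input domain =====

-- B replaces A's per-window sort by an early sortedness check on `sorts` plus a
-- sliding 128-slot character-frequency table (objective: faster, constant-factor).

-- ===== PORT A =====
-- sor: s = list(s); s.sort(); t = ''; for i in s: t += i; return t
def sor (s : String) : String :=
  let l := PySem.List.sorted s.toList (fun c => c) false
  String.ofList (l.foldl (fun t c => t ++ [c]) [])

def count (s : String) (sorts : String) : Int :=
  (PySem.List.pyRange 0 (PySem.Str.len s - 8)).foldl
    (fun a i =>
      if sor (PySem.Str.slice s (some i) (some (i + 9))) = sorts then a + 1 else a)
    0

-- ===== PORT B =====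
def count_alt (s : String) (sorts : String) : Int :=
  let n := s.toList.length
  if n < 9 ∨ sorts.toList ≠ PySem.List.sorted sorts.toList (fun c => c) false then 0
  else
    let tgt := sorts.toList.foldl (fun v c => v.modify c.toNat (· + 1)) (List.replicate 128 0)
    let cur := (PySem.Str.slice s none (some 9)).toList.foldl
      (fun v c => v.modify c.toNat (· + 1)) (List.replicate 128 0)
    let a : Int := if cur = tgt then 1 else 0
    -- loop indices i and i-9 are always in range, so the pyGetD default is never read
    ((PySem.List.pyRange 9 (n : Int)).foldl
      (fun (st : List Int × Int) i =>
        let cur := (st.1.modify (PySem.List.pyGetD s.toList i ' ').toNat (· + 1)).modify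
          (PySem.List.pyGetD s.toList (i - 9) ' ').toNat (· - 1)
        (cur, if cur = tgt then st.2 + 1 else st.2))
      (cur, a)).2

-- ===== PRECONDITION & SPEC =====
def Spec_count (s : String) (sorts : String) (out : Int) : Prop := out = count_alt s sorts
instance (s : String) (sorts : String) (out : Int) : Decidable (Spec_count s sorts out) := by unfold Spec_count; infer_instance

-- ===== CLAIM (what is proved, stated in full; the proofs are below) =====
def Claim_equal_count : Prop := ∀ (s : String) (sorts : String), Dom_count s sorts → Spec_count s sorts (count s sorts)

-- ===== LEMMAS AND PROOFS =====

def pvCnt (l : List Char) : List Int :=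
  l.foldl (fun v c => v.modify c.toNat (· + 1)) (List.replicate 128 0)
theorem getElem?_foldl_modify (l : List Char) (v : List Int) (k : Nat) :
    (l.foldl (fun v c => v.modify c.toNat (· + 1)) v)[k]? =
      (fun a => a + (l.countP (fun c => decide (c.toNat = k)) : Int)) <$> v[k]? := by
  induction l generalizing v with
  | nil => simp
  | cons c l ih =>
    simp only [List.foldl_cons, List.countP_cons]
    rw [ih, List.getElem?_modify]
    by_cases h : c.toNat = k
    · simp only [h, decide_true, if_true]
      cases v[k]? <;> simp
      ring
    · simp only [h, decide_false, if_false]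
      cases v[k]? <;> simp

theorem pvCnt_getElem? (l : List Char) (k : Nat) :
    (pvCnt l)[k]? =
      if k < 128 then some ((l.countP (fun c => decide (c.toNat = k)) : Int)) else none := by
  rw [pvCnt, getElem?_foldl_modify]
  have hr : (List.replicate 128 (0 : Int))[k]? = if k < 128 then some 0 else none := by
    rw [List.getElem?_replicate]
  rw [hr]
  by_cases h : k < 128 <;> simp [h]

theorem pvCnt_eq_iff (l₁ l₂ : List Char) :
    pvCnt l₁ = pvCnt l₂ ↔
      ∀ k < 128, l₁.countP (fun c => decide (c.toNat = k)) =
        l₂.countP (fun c => decide (c.toNat = k)) := by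
  constructor
  · intro h k hk
    have := congrArg (fun v => v[k]?) h
    simp only [pvCnt_getElem?, if_pos hk] at this
    exact_mod_cast Option.some_inj.mp this
  · intro h
    apply List.ext_getElem?
    intro i
    rw [pvCnt_getElem?, pvCnt_getElem?]
    by_cases hi : i < 128
    · simp [hi, h i hi]
    · simp [hi]

theorem pvCnt_eq_iff_perm (l₁ l₂ : List Char)
    (h₁ : ∀ c ∈ l₁, c.toNat < 128) (h₂ : ∀ c ∈ l₂, c.toNat < 128) :
    pvCnt l₁ = pvCnt l₂ ↔ l₁.Perm l₂ := by
  rw [pvCnt_eq_iff]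
  constructor
  · intro h
    rw [List.perm_iff_count]
    intro c
    by_cases hc : c.toNat < 128
    · have := h c.toNat hc
      have key : ∀ (l : List Char), l.count c = l.countP (fun x => decide (x.toNat = c.toNat)) := by
        intro l
        rw [List.count_eq_countP]
        apply List.countP_congr
        intro x _
        simp only [beq_iff_eq, decide_eq_true_eq]
        exact ⟨fun hx => by rw [hx], fun hx => Char.ext (UInt32.toNat_inj.mp hx)⟩
      rw [key, key]; exact this
    · have e₁ : l₁.count c = 0 := by
        rw [List.count_eq_zero]; intro hm; exact hc (h₁ c hm)
      have e₂ : l₂.count c = 0 := by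
        rw [List.count_eq_zero]; intro hm; exact hc (h₂ c hm)
      rw [e₁, e₂]
  · intro h k _
    exact h.countP_eq _

def pvWin (s : List Char) (k : Nat) : List Char := (s.drop k).take 9

theorem pvCnt_slide (s : List Char) (m : Nat) (h9 : 9 ≤ m) (hm : m < s.length) :
    ((pvCnt (pvWin s (m - 9))).modify (s.getD m ' ').toNat (· + 1)).modify
        (s.getD (m - 9) ' ').toNat (· - 1) = pvCnt (pvWin s (m - 8)) := by
  have hm9 : m - 9 < s.length := by omega
  have hgm : s.getD m ' ' = s[m] := List.getD_eq_getElem s ' ' hm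
  have hgm9 : s.getD (m - 9) ' ' = s[m - 9] := List.getD_eq_getElem s ' ' hm9
  set mid := (s.drop (m - 8)).take 8 with hmid
  have hw1 : pvWin s (m - 9) = s[m - 9] :: mid := by
    rw [pvWin, List.drop_eq_getElem_cons hm9, show m - 9 + 1 = m - 8 by omega]
    exact List.take_succ_cons
  have hw2 : pvWin s (m - 8) = mid ++ [s[m]] := by
    have h8 : 8 < (s.drop (m - 8)).length := by
      rw [List.length_drop]; omega
    rw [pvWin, List.take_succ_eq_append_getElem h8, List.getElem_drop]
    simp only [show m - 8 + 8 = m by omega]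
    rw [hmid]
  apply List.ext_getElem?
  intro k
  rw [List.getElem?_modify, List.getElem?_modify, pvCnt_getElem?, pvCnt_getElem?, hw1, hw2,
      List.countP_cons, List.countP_append, hgm, hgm9]
  by_cases hk : k < 128
  · simp only [if_pos hk, Option.map_some]
    split_ifs <;> simp_all <;> push_cast <;> omega
  · simp [hk]

theorem loopB (s : List Char) (tgt : List Int) (m : Nat) (h9 : 9 ≤ m) (hmn : m ≤ s.length)
    (a : Int) :
    ((PySem.List.pyRange (m : Int) (s.length : Int)).foldl
      (fun (st : List Int × Int) i =>
        let cur := (st.1.modify (PySem.List.pyGetD s i ' ').toNat (· + 1)).modify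
          (PySem.List.pyGetD s (i - 9) ' ').toNat (· - 1)
        (cur, if cur = tgt then st.2 + 1 else st.2))
      (pvCnt (pvWin s (m - 9)), a)).2
    = a + ((List.range' (m - 8) (s.length - m)).countP
        (fun j => decide (pvCnt (pvWin s j) = tgt)) : Int) := by
  induction hfuel : s.length - m generalizing m a with
  | zero =>
    have hle : (s.length : Int) ≤ (m : Int) := by omega
    rw [PySem.List.pyRange_one_eq_nil hle]
    simp
  | succ f ih =>
    have hlt : m < s.length := by omega
    have hcast : ((m : Int)) < (s.length : Int) := by omega
    rw [PySem.List.pyRange_one_cons hcast, List.foldl_cons]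
    have hget : PySem.List.pyGetD s (m : Int) ' ' = s.getD m ' ' := by
      rw [PySem.List.pyGetD_natCast]
    have hget9 : PySem.List.pyGetD s ((m : Int) - 9) ' ' = s.getD (m - 9) ' ' := by
      rw [show (m : Int) - 9 = ((m - 9 : Nat) : Int) by omega, PySem.List.pyGetD_natCast]
    simp only [hget, hget9, pvCnt_slide s m h9 hlt]
    have hih := ih (m + 1) (by omega) (by omega)
      (if pvCnt (pvWin s (m - 8)) = tgt then a + 1 else a) (by omega)
    rw [show m + 1 - 9 = m - 8 by omega] at hih
    rw [show m + 1 - 8 = m - 8 + 1 by omega] at hih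
    rw [show (m : Int) + 1 = ((m + 1 : Nat) : Int) by push_cast; ring, hih,
        List.range'_succ, List.countP_cons]
    split_ifs <;> simp_all <;> omega

theorem count_eq_countP (s sorts : String) :
    count s sorts = ((List.range (s.toList.length - 8)).countP
      (fun k => decide (PySem.List.sorted (pvWin s.toList k) (fun c => c) = sorts.toList)) : Int) := by
  unfold count
  rw [PySem.Str.len_eq]
  rw [show (fun (a : Int) (i : Int) => if sor (PySem.Str.slice s (some i) (some (i + 9))) = sorts then a + 1 else a)
        = (fun (a : Int) (i : Int) => if (fun i => decide (sor (PySem.Str.slice s (some i) (some (i + 9))) = sorts)) i = true then a + 1 else a) from by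
      funext a i; simp]
  rw [PySem.List.foldl_count_if, PySem.List.pyRange_one, List.countP_map]
  rw [show ((s.toList.length : Int) - 8 - 0).toNat = s.toList.length - 8 by omega]
  rw [zero_add]
  refine congrArg (Nat.cast : Nat → Int) (List.countP_congr ?_)
  intro k hk
  simp only [Function.comp, zero_add, decide_eq_true_eq]
  have hslice : (PySem.Str.slice s (some (k : Int)) (some ((k : Int) + 9))).toList = pvWin s.toList k := by
    rw [PySem.Str.toList_slice, PySem.Chars.slice_eq_listSlice]
    have h9 := PySem.List.slice_natCast_add (xs := s.toList) (j := k) (n := 9)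
    rw [pvWin]
    rw [show ((k : Int) + 9) = ((k : Int) + ((9 : Nat) : Int)) by push_cast; ring]
    exact h9
  rw [sor, hslice, String.ofList_eq, PySem.List.foldl_append_singleton, List.nil_append]

theorem dom_lt_128 (t : String) (h : pvDomStr t = true) : ∀ c ∈ t.toList, c.toNat < 128 := by
  intro c hc
  have := List.all_eq_true.mp h c hc
  simp only [pvDomChar, Bool.or_eq_true, Bool.and_eq_true, decide_eq_true_eq, beq_iff_eq] at this
  omega

theorem win_mem (s : List Char) (k : Nat) (c : Char) (hc : c ∈ pvWin s k) : c ∈ s :=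
  List.mem_of_mem_drop (List.mem_of_mem_take hc)

theorem pred_iff (s sorts : String) (hdoms : pvDomStr s = true) (hdomt : pvDomStr sorts = true)
    (hsorted : sorts.toList = PySem.List.sorted sorts.toList (fun c => c) false) (k : Nat) :
    PySem.List.sorted (pvWin s.toList k) (fun c => c) = sorts.toList ↔
      pvCnt (pvWin s.toList k) = pvCnt sorts.toList := by
  have hperm : pvCnt (pvWin s.toList k) = pvCnt sorts.toList ↔ (pvWin s.toList k).Perm sorts.toList :=
    pvCnt_eq_iff_perm _ _ (fun c hc => dom_lt_128 s hdoms c (win_mem _ _ _ hc))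
      (fun c hc => dom_lt_128 sorts hdomt c hc)
  rw [hperm]
  constructor
  · intro h
    exact (h ▸ PySem.List.sorted_perm (pvWin s.toList k) (fun c => c) false).symm
  · intro h
    apply PySem.List.sorted_id_eq_of_perm_of_pairwise
    · exact h.symm
    · rw [hsorted]
      exact PySem.List.sorted_pairwise _ _

theorem count_eq_alt (s sorts : String) (hdom : Dom_count s sorts) : count s sorts = count_alt s sorts := by
  have hdom' : (pvDomStr s && pvDomStr sorts) = true := hdom
  rw [Bool.and_eq_true] at hdom'
  obtain ⟨hdoms, hdomt⟩ := hdom'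
  rw [count_eq_countP]
  simp only [count_alt]
  by_cases hcond : s.toList.length < 9 ∨ sorts.toList ≠ PySem.List.sorted sorts.toList (fun c => c) false
  · rw [if_pos hcond]
    rcases hcond with hlt | hne
    · rw [show s.toList.length - 8 = 0 by omega]
      simp
    · rw [List.countP_eq_zero.mpr, Nat.cast_zero]
      intro k _
      simp only [decide_eq_true_eq]
      intro h
      apply hne
      have hp : List.Pairwise (fun a b : Char => a ≤ b) sorts.toList := by
        rw [← h]; exact PySem.List.sorted_pairwise _ _
      rw [PySem.List.sorted_eq_self_of_pairwise _ _ hp]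
  · rw [if_neg hcond]
    push Not at hcond
    obtain ⟨h9, hsorted⟩ := hcond
    have hcur : (PySem.Str.slice s none (some 9)).toList.foldl
        (fun v c => v.modify c.toNat (· + 1)) (List.replicate 128 0) = pvCnt (pvWin s.toList 0) := by
      rw [PySem.Str.toList_slice, PySem.Chars.slice_eq_listSlice,
          PySem.List.slice_to s.toList (by norm_num : (0 : Int) ≤ 9)]
      rfl
    rw [hcur]
    rw [show sorts.toList.foldl (fun v c => v.modify c.toNat (· + 1)) (List.replicate 128 0)
          = pvCnt sorts.toList from rfl]
    have hl := loopB s.toList (pvCnt sorts.toList) 9 (le_refl 9) (by omega)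
      (if pvCnt (pvWin s.toList 0) = pvCnt sorts.toList then 1 else 0)
    simp only [Nat.cast_ofNat, show (9:Nat) - 9 = 0 from rfl, show (9:Nat) - 8 = 1 from rfl] at hl
    rw [hl]
    rw [List.countP_congr (q := fun k => decide (pvCnt (pvWin s.toList k) = pvCnt sorts.toList)) ?_]
    · rw [List.range_eq_range', show s.toList.length - 8 = (s.toList.length - 9) + 1 by omega,
          List.range'_succ, List.countP_cons]
      push_cast
      simp only [decide_eq_true_eq]
      split_ifs <;> omega
    · intro k _
      simp only [decide_eq_true_eq]
      exact pred_iff s sorts hdoms hdomt hsorted k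

-- ===== VERDICT (by name: the statement is the Claim_ definition above) =====
theorem count_spec : Claim_equal_count := by
  intro s sorts hdom
  unfold Spec_count
  exact count_eq_alt s sorts hdom
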